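-- pv_equiv track=rewrite | github.com/Kamivision/VibeGamer | server/game_app/views.py | apply_excluded_tags
-- ===== SOURCE A (Python) =====
-- def slugify_label(value):
--     if not isinstance(value, str):
--         return ""
--
--     slug = value.strip().lower()
--     slug = slug.replace("&", "and")
--     slug = slug.replace("/", "-")
--     slug = "-".join(part for part in slug.split())
--     return slug
--
-- def apply_excluded_tags(raw_results, excluded_tags):
--     if not isinstance(excluded_tags, list) or len(excluded_tags) == 0:
--         return raw_results
--
--     excluded_slugs = set()
--     for tag in excluded_tags:
--         slug = slugify_label(tag)
--         if slug:
--             excluded_slugs.add(slug)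
--
--     if len(excluded_slugs) == 0:
--         return raw_results
--
--     filtered = []
--     for game in raw_results:
--         game_labels = set()
--
--         genres = game.get("genres") or []
--         for genre in genres:
--             if isinstance(genre, dict):
--                 name = genre.get("name")
--                 slug = slugify_label(name)
--                 if slug:
--                     game_labels.add(slug)
--
--         tags = game.get("tags") or []
--         for tag in tags:
--             if isinstance(tag, dict):
--                 name = tag.get("name")
--                 slug = slugify_label(name)
--                 if slug:
--                     game_labels.add(slug)
--
--         if excluded_slugs.isdisjoint(game_labels):
--             filtered.append(game)
--
--     return filtered
-- ===== SOURCE B (Python) =====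
-- def slugify_label(value):
--     if not isinstance(value, str):
--         return ""
--     slug = value.strip().lower()
--     slug = slug.replace("&", "and")
--     slug = slug.replace("/", "-")
--     slug = "-".join(part for part in slug.split())
--     return slug
--
-- def apply_excluded_tags(raw_results, excluded_tags):
--     if not isinstance(excluded_tags, list) or len(excluded_tags) == 0:
--         return raw_results
--
--     excluded_slugs = {s for s in map(slugify_label, excluded_tags) if s}
--     if not excluded_slugs:
--         return raw_results
--
--     # Inverted index: slug -> set of indices of games carrying that label.
--     index = {}
--     for i, game in enumerate(raw_results):
--         for key in ("genres", "tags"):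
--             for item in (game.get(key) or []):
--                 if isinstance(item, dict):
--                     slug = slugify_label(item.get("name"))
--                     if slug:
--                         index.setdefault(slug, set()).add(i)
--
--     # Union of the excluded slugs' posting lists = indices of excluded games.
--     bad = set()
--     for slug in excluded_slugs:
--         bad.update(index.get(slug, ()))
--
--     return [game for i, game in enumerate(raw_results) if i not in bad]
-- ===== Notes on version B (the rewrite author's own statement) =====
-- stated objective: alternative
-- what changed: Replaces A's per-game label-set + isdisjoint filter by an inverted index: one pass builds a dict slug -> set of game indices over all games, the excluded indices are obtained by unioning the posting sets of the excluded slugs, and the result is games whose index is not in that union.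
import Mathlib
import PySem

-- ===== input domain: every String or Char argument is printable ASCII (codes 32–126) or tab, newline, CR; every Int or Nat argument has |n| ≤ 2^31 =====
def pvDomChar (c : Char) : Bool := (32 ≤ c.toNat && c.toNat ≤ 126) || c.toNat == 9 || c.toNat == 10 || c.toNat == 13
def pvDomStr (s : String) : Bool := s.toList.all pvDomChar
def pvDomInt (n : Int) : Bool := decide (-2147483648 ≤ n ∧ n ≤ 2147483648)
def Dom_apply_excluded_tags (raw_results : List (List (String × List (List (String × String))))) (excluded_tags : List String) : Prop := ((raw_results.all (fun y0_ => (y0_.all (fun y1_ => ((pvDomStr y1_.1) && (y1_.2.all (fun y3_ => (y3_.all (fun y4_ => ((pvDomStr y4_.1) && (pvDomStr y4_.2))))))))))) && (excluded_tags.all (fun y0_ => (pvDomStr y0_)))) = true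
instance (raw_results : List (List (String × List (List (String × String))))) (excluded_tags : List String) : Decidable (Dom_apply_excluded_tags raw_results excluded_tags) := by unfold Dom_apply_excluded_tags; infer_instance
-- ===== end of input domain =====

-- B replaces A's per-game "collect all labels then isdisjoint" filter by an inverted index
-- (slug -> set of game indices) whose excluded posting sets are unioned into a set of bad
-- indices; games are then kept by index (alternative decomposition; same asymptotic cost).

-- shared module helper slugify_label (value is always a str on the typed domain)
def slugifyLabel (value : String) : String :=
  let slug := PySem.Str.lower (PySem.Str.strip value)
  let slug := PySem.Str.replace slug "&" "and"
  let slug := PySem.Str.replace slug "/" "-"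
  PySem.Str.join "-" (PySem.Str.split₀ slug)

-- slugify_label applied to dict.get("name") (None → "")
def slugOf (v : Option String) : String :=
  match v with
  | some s => slugifyLabel s
  | none => ""

-- ===== PORT A =====
def apply_excluded_tags (raw_results : List (List (String × List (List (String × String))))) (excluded_tags : List String) : List (List (String × List (List (String × String)))) :=
  if excluded_tags.length = 0 then raw_results else
  let excluded_slugs : PySem.Set String :=
    excluded_tags.foldl (fun s tag =>
      let slug := slugifyLabel tag
      if slug ≠ "" then PySem.Set.add s slug else s) PySem.Set.empty
  if excluded_slugs.length = 0 then raw_results else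
  raw_results.foldl (fun filtered game =>
    let game_labels : PySem.Set String := PySem.Set.empty
    let genres := ((PySem.Dict.mk game).get? "genres").getD []
    let game_labels := genres.foldl (fun s genre =>
      let slug := slugOf ((PySem.Dict.mk genre).get? "name")
      if slug ≠ "" then PySem.Set.add s slug else s) game_labels
    let tags := ((PySem.Dict.mk game).get? "tags").getD []
    let game_labels := tags.foldl (fun s tag =>
      let slug := slugOf ((PySem.Dict.mk tag).get? "name")
      if slug ≠ "" then PySem.Set.add s slug else s) game_labels
    if PySem.Set.isdisjoint excluded_slugs game_labels then filtered ++ [game] else filtered) []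

-- ===== PORT B =====
def apply_excluded_tags_alt (raw_results : List (List (String × List (List (String × String))))) (excluded_tags : List String) : List (List (String × List (List (String × String)))) :=
  if excluded_tags.isEmpty then raw_results else
  let excluded_slugs : PySem.Set String :=
    PySem.Set.ofList ((excluded_tags.map slugifyLabel).filter (fun s => s ≠ ""))
  if excluded_slugs.isEmpty then raw_results else
  -- inverted index: slug -> set of indices of games carrying that label
  let index : PySem.Dict String (PySem.Set Int) :=
    (PySem.List.enumerate raw_results).foldl (fun d p =>
      (["genres", "tags"] : List String).foldl (fun d key =>
        (((PySem.Dict.mk p.2).get? key).getD []).foldl (fun d item =>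
          let slug := slugOf ((PySem.Dict.mk item).get? "name")
          if slug ≠ "" then PySem.Dict.modify d slug PySem.Set.empty (fun s => PySem.Set.add s p.1) else d) d) d)
      PySem.Dict.empty
  -- union of the excluded slugs' posting sets = indices of excluded games
  let bad : PySem.Set Int :=
    excluded_slugs.foldl (fun b slug => PySem.Set.update b (index.getD slug PySem.Set.empty)) PySem.Set.empty
  ((PySem.List.enumerate raw_results).filter (fun p => !PySem.Set.contains bad p.1)).map (fun p => p.2)

-- ===== PRECONDITION & SPEC =====
def Spec_apply_excluded_tags (raw_results : List (List (String × List (List (String × String))))) (excluded_tags : List String) (out : List (List (String × List (List (String × String))))) : Prop := out = apply_excluded_tags_alt raw_results excluded_tags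
instance (raw_results : List (List (String × List (List (String × String))))) (excluded_tags : List String) (out : List (List (String × List (List (String × String))))) : Decidable (Spec_apply_excluded_tags raw_results excluded_tags out) := by unfold Spec_apply_excluded_tags; infer_instance

-- ===== CLAIM (what is proved, stated in full; the proofs are below) =====
def Claim_equal_apply_excluded_tags : Prop := ∀ (raw_results : List (List (String × List (List (String × String))))) (excluded_tags : List String), Dom_apply_excluded_tags raw_results excluded_tags → Spec_apply_excluded_tags raw_results excluded_tags (apply_excluded_tags raw_results excluded_tags)

-- ===== LEMMAS AND PROOFS =====

-- all (possibly empty) slugified labels of one game, genres then tags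
def labelList (game : List (String × List (List (String × String)))) : List String :=
  ((((PySem.Dict.mk game).get? "genres").getD []) ++ (((PySem.Dict.mk game).get? "tags").getD [])).map
    (fun item => slugOf ((PySem.Dict.mk item).get? "name"))

-- A's conditional-add fold = ofList of the filtered mapped list (same list, same order)
theorem foldl_condAdd_eq_update {β : Type} (f : β → String) (l : List β) (s : PySem.Set String) :
    l.foldl (fun s b => if f b ≠ "" then PySem.Set.add s (f b) else s) s
      = PySem.Set.update s ((l.map f).filter (fun x => x ≠ "")) := by
  induction l generalizing s with
  | nil => rfl
  | cons b t ih =>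
    simp only [List.foldl_cons, List.map_cons, List.filter_cons]
    split_ifs with h1 h2 h2
    · rw [ih, PySem.Set.update_cons]
    · exact absurd h1 (by simpa using h2)
    · exact absurd (by simpa using h2) h1
    · exact ih s

theorem mem_foldl_condAdd {β : Type} (f : β → String) (l : List β) (s : PySem.Set String) (y : String) :
    y ∈ l.foldl (fun s b => if f b ≠ "" then PySem.Set.add s (f b) else s) s
      ↔ y ∈ s ∨ ∃ b ∈ l, f b ≠ "" ∧ y = f b := by
  rw [foldl_condAdd_eq_update, PySem.Set.mem_update]
  simp only [List.mem_filter, List.mem_map, decide_eq_true_eq]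
  aesop

-- membership in A's excluded-slug set = membership in B's
theorem excluded_eq (excluded_tags : List String) :
    excluded_tags.foldl (fun s tag =>
      let slug := slugifyLabel tag
      if slug ≠ "" then PySem.Set.add s slug else s) PySem.Set.empty
    = PySem.Set.ofList ((excluded_tags.map slugifyLabel).filter (fun s => s ≠ "")) := by
  rw [foldl_condAdd_eq_update]; rfl

-- A's per-game label set: membership = nonempty member of labelList
theorem mem_gameSet (game : List (String × List (List (String × String)))) (y : String) :
    y ∈ ((((PySem.Dict.mk game).get? "tags").getD []).foldl (fun s tag =>
        let slug := slugOf ((PySem.Dict.mk tag).get? "name")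
        if slug ≠ "" then PySem.Set.add s slug else s)
       ((((PySem.Dict.mk game).get? "genres").getD []).foldl (fun s genre =>
        let slug := slugOf ((PySem.Dict.mk genre).get? "name")
        if slug ≠ "" then PySem.Set.add s slug else s) PySem.Set.empty))
    ↔ y ≠ "" ∧ y ∈ labelList game := by
  rw [mem_foldl_condAdd, mem_foldl_condAdd]
  simp only [labelList, List.mem_map, List.mem_append, PySem.Set.empty]
  aesop

-- the per-game index step: one label's conditional modify, folded over a label list
theorem mem_getD_labelFold (ls : List String) (j : Int) (d : PySem.Dict String (PySem.Set Int))
    (slug : String) (i : Int) :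
    i ∈ (ls.foldl (fun d s => if s ≠ "" then PySem.Dict.modify d s PySem.Set.empty (fun S => PySem.Set.add S j) else d) d).getD slug PySem.Set.empty
      ↔ i ∈ d.getD slug PySem.Set.empty ∨ (slug ≠ "" ∧ slug ∈ ls ∧ i = j) := by
  induction ls generalizing d with
  | nil => simp
  | cons s t ih =>
    simp only [List.foldl_cons]
    by_cases hs : s = ""
    · subst hs
      simp only [ne_eq, not_true_eq_false, if_false, ih]
      aesop
    · rw [if_pos (by simpa using hs), ih]
      by_cases hsl : slug = s
      · subst hsl
        rw [PySem.Dict.getD_modify_self, PySem.Set.mem_add]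
        aesop
      · rw [PySem.Dict.getD_modify, if_neg hsl]
        aesop

-- the per-game key fold equals a fold over the game's label list
theorem labelStep_eq (p : Int × List (String × List (List (String × String))))
    (d : PySem.Dict String (PySem.Set Int)) :
    (["genres", "tags"] : List String).foldl (fun d key =>
        (((PySem.Dict.mk p.2).get? key).getD []).foldl (fun d item =>
          let slug := slugOf ((PySem.Dict.mk item).get? "name")
          if slug ≠ "" then PySem.Dict.modify d slug PySem.Set.empty (fun s => PySem.Set.add s p.1) else d) d) d
    = (labelList p.2).foldl (fun d s => if s ≠ "" then PySem.Dict.modify d s PySem.Set.empty (fun S => PySem.Set.add S p.1) else d) d := by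
  simp only [List.foldl_cons, List.foldl_nil, labelList, List.foldl_map, List.foldl_append]

theorem mem_labelFoldGames (l : List (Int × List (String × List (List (String × String)))))
    (d : PySem.Dict String (PySem.Set Int)) (slug : String) (i : Int) :
    i ∈ (l.foldl (fun d p =>
      (labelList p.2).foldl (fun d s => if s ≠ "" then PySem.Dict.modify d s PySem.Set.empty (fun S => PySem.Set.add S p.1) else d) d) d).getD slug PySem.Set.empty
    ↔ i ∈ d.getD slug PySem.Set.empty ∨ ∃ p ∈ l, slug ≠ "" ∧ slug ∈ labelList p.2 ∧ i = p.1 := by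
  induction l generalizing d with
  | nil => simp
  | cons p t ih =>
    rw [List.foldl_cons, ih, mem_getD_labelFold]
    aesop

-- B's index fold over enumerated games
theorem mem_getD_indexFold (l : List (Int × List (String × List (List (String × String)))))
    (d : PySem.Dict String (PySem.Set Int)) (slug : String) (i : Int) :
    i ∈ (l.foldl (fun d p =>
      (["genres", "tags"] : List String).foldl (fun d key =>
        (((PySem.Dict.mk p.2).get? key).getD []).foldl (fun d item =>
          let slug := slugOf ((PySem.Dict.mk item).get? "name")
          if slug ≠ "" then PySem.Dict.modify d slug PySem.Set.empty (fun s => PySem.Set.add s p.1) else d) d) d) d).getD slug PySem.Set.empty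
    ↔ i ∈ d.getD slug PySem.Set.empty ∨ ∃ p ∈ l, slug ≠ "" ∧ slug ∈ labelList p.2 ∧ i = p.1 := by
  have hfe : (fun (d : PySem.Dict String (PySem.Set Int)) (p : Int × List (String × List (List (String × String)))) =>
      (["genres", "tags"] : List String).foldl (fun d key =>
        (((PySem.Dict.mk p.2).get? key).getD []).foldl (fun d item =>
          let slug := slugOf ((PySem.Dict.mk item).get? "name")
          if slug ≠ "" then PySem.Dict.modify d slug PySem.Set.empty (fun s => PySem.Set.add s p.1) else d) d) d)
    = (fun d p => (labelList p.2).foldl (fun d s => if s ≠ "" then PySem.Dict.modify d s PySem.Set.empty (fun S => PySem.Set.add S p.1) else d) d) :=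
    funext fun d => funext fun p => labelStep_eq p d
  rw [hfe]
  exact mem_labelFoldGames l d slug i

-- B's bad-index union
theorem mem_badFold (E : List String) (index : PySem.Dict String (PySem.Set Int))
    (b : PySem.Set Int) (i : Int) :
    i ∈ E.foldl (fun b slug => PySem.Set.update b (index.getD slug PySem.Set.empty)) b
      ↔ i ∈ b ∨ ∃ slug ∈ E, i ∈ index.getD slug PySem.Set.empty := by
  induction E generalizing b with
  | nil => simp
  | cons s t ih =>
    simp only [List.foldl_cons, ih, PySem.Set.mem_update]
    aesop

-- enumerate-filter-map by an index-pair predicate = plain filter by the per-element predicate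
theorem filter_enumerate_map {α : Type} (q : Int × α → Bool) (keep : α → Bool) :
    ∀ (xs : List α) (s : Int), (∀ (k : Nat) (h : k < xs.length), q (s + k, xs[k]) = keep xs[k]) →
    ((PySem.List.enumerate xs s).filter q).map (fun p => p.2) = xs.filter keep := by
  intro xs
  induction xs with
  | nil => intro s _; rfl
  | cons x t ih =>
    intro s h
    rw [PySem.List.enumerate_cons]
    have h0 : q (s, x) = keep x := by simpa using h 0 (by simp)
    have ht : ∀ (k : Nat) (hk : k < t.length), q ((s + 1) + k, t[k]) = keep t[k] := by
      intro k hk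
      have := h (k + 1) (by simpa using Nat.succ_lt_succ hk)
      have e : (s + 1) + (k : Int) = s + ((k : Int) + 1) := by ring
      rw [e]
      simpa [add_comm] using this
    simp only [List.filter_cons]
    by_cases hx : keep x = true
    · simp only [h0, hx, if_true, List.map_cons, ih (s + 1) ht]
    · rw [Bool.not_eq_true] at hx
      simp only [h0, hx, Bool.false_eq_true, if_false, ih (s + 1) ht]

-- A's append fold is a filter
theorem foldl_append_if_filter {α : Type} (p : α → Bool) (l : List α) (acc : List α) :
    l.foldl (fun acc x => if p x then acc ++ [x] else acc) acc = acc ++ l.filter p := by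
  induction l generalizing acc with
  | nil => simp
  | cons x t ih =>
    simp only [List.foldl_cons, List.filter_cons]
    by_cases h : p x = true
    · simp [h, ih]
    · simp [h, ih]

-- ===== VERDICT (by name: the statement is the Claim_ definition above) =====
theorem apply_excluded_tags_spec : Claim_equal_apply_excluded_tags := by
  intro raw_results excluded_tags _
  show apply_excluded_tags raw_results excluded_tags = apply_excluded_tags_alt raw_results excluded_tags
  unfold apply_excluded_tags apply_excluded_tags_alt
  rw [excluded_eq]
  by_cases h0 : excluded_tags = []
  · simp [h0]
  · simp only [List.isEmpty_iff, h0, if_false, List.length_eq_zero_iff]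
    set E := PySem.Set.ofList ((excluded_tags.map slugifyLabel).filter (fun s => s ≠ "")) with hEdef
    by_cases hE : E = []
    · rw [if_pos hE, if_pos hE]
    · rw [if_neg hE, if_neg hE]
      rw [foldl_append_if_filter]
      simp only [List.nil_append]
      refine Eq.symm (filter_enumerate_map _ _ raw_results 0 ?_)
      intro k hk
      beta_reduce
      have hbad : ∀ (i : Int),
          PySem.Set.contains (E.foldl (fun b slug => PySem.Set.update b
            (PySem.Dict.getD ((PySem.List.enumerate raw_results).foldl (fun d p =>
              (["genres", "tags"] : List String).foldl (fun d key =>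
                (((PySem.Dict.mk p.2).get? key).getD []).foldl (fun d item =>
                  let slug := slugOf ((PySem.Dict.mk item).get? "name")
                  if slug ≠ "" then PySem.Dict.modify d slug PySem.Set.empty (fun s => PySem.Set.add s p.1) else d) d) d)
              PySem.Dict.empty) slug PySem.Set.empty)) PySem.Set.empty) i = true
          ↔ ∃ slug ∈ E, ∃ p ∈ PySem.List.enumerate raw_results, slug ≠ "" ∧ slug ∈ labelList p.2 ∧ i = p.1 := by
        intro i
        rw [PySem.Set.contains_iff, mem_badFold]
        constructor
        · rintro (h | ⟨slug, hs, hmem⟩)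
          · exact absurd h (by simp [PySem.Set.empty])
          · rw [mem_getD_indexFold] at hmem
            rcases hmem with h | h
            · exact absurd h (by simp [PySem.Dict.getD_empty, PySem.Set.empty])
            · exact ⟨slug, hs, h⟩
        · rintro ⟨slug, hs, h⟩
          exact Or.inr ⟨slug, hs, (mem_getD_indexFold _ _ _ _).2 (Or.inr h)⟩
      have hiff : PySem.Set.contains (E.foldl (fun b slug => PySem.Set.update b
            (PySem.Dict.getD ((PySem.List.enumerate raw_results).foldl (fun d p =>
              (["genres", "tags"] : List String).foldl (fun d key =>
                (((PySem.Dict.mk p.2).get? key).getD []).foldl (fun d item =>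
                  let slug := slugOf ((PySem.Dict.mk item).get? "name")
                  if slug ≠ "" then PySem.Dict.modify d slug PySem.Set.empty (fun s => PySem.Set.add s p.1) else d) d) d)
              PySem.Dict.empty) slug PySem.Set.empty)) PySem.Set.empty) ((0 : Int) + (k : Int)) = true
          ↔ ¬ (PySem.Set.isdisjoint E
            ((((PySem.Dict.mk raw_results[k]).get? "tags").getD []).foldl (fun s tag =>
              let slug := slugOf ((PySem.Dict.mk tag).get? "name")
              if slug ≠ "" then PySem.Set.add s slug else s)
             ((((PySem.Dict.mk raw_results[k]).get? "genres").getD []).foldl (fun s genre =>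
              let slug := slugOf ((PySem.Dict.mk genre).get? "name")
              if slug ≠ "" then PySem.Set.add s slug else s) PySem.Set.empty)) = true) := by
        rw [hbad]
        constructor
        · rintro ⟨slug, hsE, p, hp, hne, hlab, hip⟩ hdis
          rw [PySem.List.mem_enumerate_iff] at hp
          obtain ⟨k', hk', rfl⟩ := hp
          have hkk : k' = k := by
            simp only at hip
            omega
          subst hkk
          have := (PySem.Set.isdisjoint_iff _ _).1 hdis slug hsE
          exact this ((mem_gameSet _ _).2 ⟨hne, by simpa using hlab⟩)
        · intro hdis
          have hnd : ¬ (∀ x ∈ E, x ∉ ((((PySem.Dict.mk raw_results[k]).get? "tags").getD []).foldl (fun s tag =>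
              let slug := slugOf ((PySem.Dict.mk tag).get? "name")
              if slug ≠ "" then PySem.Set.add s slug else s)
             ((((PySem.Dict.mk raw_results[k]).get? "genres").getD []).foldl (fun s genre =>
              let slug := slugOf ((PySem.Dict.mk genre).get? "name")
              if slug ≠ "" then PySem.Set.add s slug else s) PySem.Set.empty))) := by
            rw [← PySem.Set.isdisjoint_iff]
            exact hdis
          push Not at hnd
          obtain ⟨slug, hsE, hmem⟩ := hnd
          rw [mem_gameSet] at hmem
          refine ⟨slug, hsE, ((k : Int), raw_results[k]), ?_, hmem.1, by simpa [labelList] using hmem.2, by simp⟩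
          rw [PySem.List.mem_enumerate_iff]
          exact ⟨k, hk, by simp⟩
      by_cases hdis : PySem.Set.isdisjoint E
          ((((PySem.Dict.mk raw_results[k]).get? "tags").getD []).foldl (fun s tag =>
            let slug := slugOf ((PySem.Dict.mk tag).get? "name")
            if slug ≠ "" then PySem.Set.add s slug else s)
           ((((PySem.Dict.mk raw_results[k]).get? "genres").getD []).foldl (fun s genre =>
            let slug := slugOf ((PySem.Dict.mk genre).get? "name")
            if slug ≠ "" then PySem.Set.add s slug else s) PySem.Set.empty)) = true
      · rw [hdis]
        have hc : ¬ _ = true := fun hc => (hiff.1 hc) hdis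
        simpa using hc
      · have hf : PySem.Set.isdisjoint E
            ((((PySem.Dict.mk raw_results[k]).get? "tags").getD []).foldl (fun s tag =>
              let slug := slugOf ((PySem.Dict.mk tag).get? "name")
              if slug ≠ "" then PySem.Set.add s slug else s)
             ((((PySem.Dict.mk raw_results[k]).get? "genres").getD []).foldl (fun s genre =>
              let slug := slugOf ((PySem.Dict.mk genre).get? "name")
              if slug ≠ "" then PySem.Set.add s slug else s) PySem.Set.empty)) = false :=
          Bool.eq_false_iff.mpr hdis
        rw [hf]
        have hc := hiff.2 hdis
        simpa using hc
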